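-- pv_equiv track=rewrite | github.com/mcardwell-Buddy/Main | Back_End/multi_step_mission_planner.py | _infer_step_objective_type
-- ===== SOURCE A (Python) =====
-- def _infer_step_objective_type(step_description: str) -> str:
--     """Infer objective type from step description"""
--     desc_lower = step_description.lower()
--
--     if any(word in desc_lower for word in ['extract', 'pull', 'get data', 'scrape']):
--         return 'extract'
--     elif any(word in desc_lower for word in ['navigate', 'go to', 'visit', 'open']):
--         return 'navigate'
--     elif any(word in desc_lower for word in ['search', 'find', 'look up', 'research']):
--         return 'search'
--     elif any(word in desc_lower for word in ['calculate', 'compute', 'solve']):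
--         return 'calculate'
--     elif any(word in desc_lower for word in ['write', 'create', 'generate', 'compose']):
--         return 'generate'
--     else:
--         return 'search'  # Default
-- ===== SOURCE B (Python) =====
-- _KEYWORD_CATEGORY = {
--     'extract': 'extract', 'pull': 'extract', 'get data': 'extract', 'scrape': 'extract',
--     'navigate': 'navigate', 'go to': 'navigate', 'visit': 'navigate', 'open': 'navigate',
--     'search': 'search', 'find': 'search', 'look up': 'search', 'research': 'search',
--     'calculate': 'calculate', 'compute': 'calculate', 'solve': 'calculate',
--     'write': 'generate', 'create': 'generate', 'generate': 'generate', 'compose': 'generate',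
-- }
-- _PRIORITY = ['extract', 'navigate', 'search', 'calculate', 'generate']
--
-- def _infer_step_objective_type(step_description: str) -> str:
--     """Infer objective type: single scan over the string collecting every keyword
--     that starts at each position, then resolve by category priority."""
--     desc = step_description.lower()
--     matched = set()
--     for i in range(len(desc)):
--         for keyword, category in _KEYWORD_CATEGORY.items():
--             if desc.startswith(keyword, i):
--                 matched.add(category)
--     for category in _PRIORITY:
--         if category in matched:
--             return category
--     return 'search'
-- ===== Notes on version B (the rewrite author's own statement) =====
-- stated objective: alternative
-- what changed: Instead of five ordered any-substring membership tests, B makes one left-to-right scan of the lowered string, collecting at each position the categories of all keywords that start there into a set, and then resolves the collected set by a fixed category priority order.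
import Mathlib
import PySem

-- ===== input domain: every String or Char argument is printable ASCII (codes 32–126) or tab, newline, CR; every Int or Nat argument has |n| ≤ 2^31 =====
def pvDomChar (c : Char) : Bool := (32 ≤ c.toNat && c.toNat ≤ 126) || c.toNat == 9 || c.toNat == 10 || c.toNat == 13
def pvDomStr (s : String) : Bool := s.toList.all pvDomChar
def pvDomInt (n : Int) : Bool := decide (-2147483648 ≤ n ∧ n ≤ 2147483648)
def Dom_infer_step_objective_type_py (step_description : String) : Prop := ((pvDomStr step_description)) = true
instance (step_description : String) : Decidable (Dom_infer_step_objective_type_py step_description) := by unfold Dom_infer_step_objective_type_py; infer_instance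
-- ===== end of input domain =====

-- B replaces the ordered any-substring cascade with one positional scan of the lowered
-- string collecting matched categories into a set, resolved afterwards by priority order
-- (alternative algorithm, same asymptotic cost).

-- ===== PORT A =====
def infer_step_objective_type_py (step_description : String) : String :=
  let desc_lower := PySem.Str.lower step_description
  if (["extract", "pull", "get data", "scrape"].any fun word => PySem.Str.isIn word desc_lower) then
    "extract"
  else if (["navigate", "go to", "visit", "open"].any fun word => PySem.Str.isIn word desc_lower) then
    "navigate"
  else if (["search", "find", "look up", "research"].any fun word => PySem.Str.isIn word desc_lower) then
    "search"
  else if (["calculate", "compute", "solve"].any fun word => PySem.Str.isIn word desc_lower) then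
    "calculate"
  else if (["write", "create", "generate", "compose"].any fun word => PySem.Str.isIn word desc_lower) then
    "generate"
  else
    "search"

-- ===== PORT B =====
-- _KEYWORD_CATEGORY.items(): a dict with distinct keys, iterated in insertion order
def pvKeywordCategory : List (String × String) :=
  [("extract", "extract"), ("pull", "extract"), ("get data", "extract"), ("scrape", "extract"),
   ("navigate", "navigate"), ("go to", "navigate"), ("visit", "navigate"), ("open", "navigate"),
   ("search", "search"), ("find", "search"), ("look up", "search"), ("research", "search"),
   ("calculate", "calculate"), ("compute", "calculate"), ("solve", "calculate"),
   ("write", "generate"), ("create", "generate"), ("generate", "generate"), ("compose", "generate")]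

def pvPriority : List String := ["extract", "navigate", "search", "calculate", "generate"]

-- the scan: for i in range(len(desc)): for (kw, cat) in items: if desc.startswith(kw, i): matched.add(cat)
-- desc.startswith(kw, i) with i ≥ 0 is exactly: kw.toList is a prefix of desc.toList.drop i
def pvScan (descL : List Char) : PySem.Set String :=
  (List.range descL.length).foldl
    (fun m i =>
      pvKeywordCategory.foldl
        (fun m kc =>
          if PySem.Chars.startswith (descL.drop i) kc.1.toList then PySem.Set.add m kc.2 else m)
        m)
    PySem.Set.empty

-- for category in _PRIORITY: if category in matched: return category; default 'search'
def pvPick (prios : List String) (matched : PySem.Set String) : String :=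
  match prios with
  | [] => "search"
  | c :: rest => if PySem.Set.contains matched c then c else pvPick rest matched

def infer_step_objective_type_py_alt (step_description : String) : String :=
  pvPick pvPriority (pvScan (PySem.Str.lower step_description).toList)

-- ===== PRECONDITION & SPEC =====
def Spec_infer_step_objective_type_py (step_description : String) (out : String) : Prop := out = infer_step_objective_type_py_alt step_description
instance (step_description : String) (out : String) : Decidable (Spec_infer_step_objective_type_py step_description out) := by unfold Spec_infer_step_objective_type_py; infer_instance

-- ===== CLAIM (what is proved, stated in full; the proofs are below) =====
def Claim_equal_infer_step_objective_type_py : Prop := ∀ (step_description : String), Dom_infer_step_objective_type_py step_description → Spec_infer_step_objective_type_py step_description (infer_step_objective_type_py step_description)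

-- ===== LEMMAS AND PROOFS =====

-- membership in the inner fold over the keyword table
theorem mem_inner_fold (l : List (String × String)) (descL : List Char) (i : Nat)
    (m : PySem.Set String) (x : String) :
    x ∈ l.foldl
      (fun m kc =>
        if PySem.Chars.startswith (descL.drop i) kc.1.toList then PySem.Set.add m kc.2 else m) m
      ↔ x ∈ m ∨ ∃ kc ∈ l, PySem.Chars.startswith (descL.drop i) kc.1.toList = true ∧ x = kc.2 := by
  induction l generalizing m with
  | nil => simp
  | cons kc rest ih =>
    simp only [List.foldl_cons, ih, List.mem_cons]
    by_cases h : PySem.Chars.startswith (descL.drop i) kc.1.toList = true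
    · simp [h, PySem.Set.mem_add]; tauto
    · simp only [if_neg h]
      constructor
      · rintro (hm | ⟨b, hb, hp, hx⟩)
        · exact Or.inl hm
        · exact Or.inr ⟨b, Or.inr hb, hp, hx⟩
      · rintro (hm | ⟨b, hb | hb, hp, hx⟩)
        · exact Or.inl hm
        · exact absurd (hb ▸ hp) h
        · exact Or.inr ⟨b, hb, hp, hx⟩

-- membership in the whole scan
theorem mem_pvScan (descL : List Char) (x : String) :
    x ∈ pvScan descL ↔
      ∃ kc ∈ pvKeywordCategory, (∃ i < descL.length, kc.1.toList <+: descL.drop i) ∧ x = kc.2 := by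
  unfold pvScan
  have main : ∀ (is : List Nat) (m : PySem.Set String),
      x ∈ is.foldl
        (fun m i =>
          pvKeywordCategory.foldl
            (fun m kc =>
              if PySem.Chars.startswith (descL.drop i) kc.1.toList then PySem.Set.add m kc.2 else m)
            m) m
      ↔ x ∈ m ∨ ∃ i ∈ is, ∃ kc ∈ pvKeywordCategory,
          PySem.Chars.startswith (descL.drop i) kc.1.toList = true ∧ x = kc.2 := by
    intro is
    induction is with
    | nil => simp
    | cons i rest ih =>
      intro m
      simp only [List.foldl_cons, ih, mem_inner_fold, List.mem_cons]
      constructor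
      · rintro ((hm | h) | ⟨j, hj, h⟩)
        · exact Or.inl hm
        · exact Or.inr ⟨i, Or.inl rfl, h⟩
        · exact Or.inr ⟨j, Or.inr hj, h⟩
      · rintro (hm | ⟨j, hj | hj, h⟩)
        · exact Or.inl (Or.inl hm)
        · exact Or.inl (Or.inr (hj ▸ h))
        · exact Or.inr ⟨j, hj, h⟩
  rw [main]
  simp only [PySem.Set.empty, List.not_mem_nil, false_or, List.mem_range,
    PySem.Chars.startswith_iff]
  constructor
  · rintro ⟨i, hi, kc, hkc, hp, hx⟩; exact ⟨kc, hkc, ⟨i, hi, hp⟩, hx⟩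
  · rintro ⟨kc, hkc, ⟨i, hi, hp⟩, hx⟩; exact ⟨i, hi, kc, hkc, hp, hx⟩

-- for a nonempty keyword, occurrence at a position below the length = substring membership
theorem exists_pos_prefix_iff (descL : List Char) (kw : List Char) (hkw : kw ≠ []) :
    (∃ i < descL.length, kw <+: descL.drop i) ↔ PySem.Chars.isIn kw descL = true := by
  rw [← PySem.Chars.exists_prefix_drop_iff_isIn]
  constructor
  · rintro ⟨i, _, hp⟩; exact ⟨i, hp⟩
  · rintro ⟨j, hp⟩
    by_cases hj : j < descL.length
    · exact ⟨j, hj, hp⟩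
    · rw [List.drop_eq_nil_of_le (Nat.le_of_not_lt hj)] at hp
      exact absurd (List.prefix_nil.mp hp) hkw

-- membership of each category in the scanned set, phrased with Str.isIn on the string
theorem contains_scan (desc : String) (x : String) :
    PySem.Set.contains (pvScan desc.toList) x =
      pvKeywordCategory.any (fun kc => decide (x = kc.2) && PySem.Str.isIn kc.1 desc) := by
  rcases Bool.eq_false_or_eq_true
      (pvKeywordCategory.any (fun kc => decide (x = kc.2) && PySem.Str.isIn kc.1 desc)) with h | h
  · rw [h]
    rw [List.any_eq_true] at h
    rcases h with ⟨kc, hkc, hb⟩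
    rw [Bool.and_eq_true, decide_eq_true_eq] at hb
    rcases hb with ⟨hx, hin⟩
    rw [PySem.Set.contains_iff, mem_pvScan]
    have hne : kc.1.toList ≠ [] := by
      fin_cases hkc <;> simp
    refine ⟨kc, hkc, ?_, hx⟩
    rw [exists_pos_prefix_iff _ _ hne]
    rw [PySem.Str.isIn_eq] at hin
    exact hin
  · rw [h]
    rw [List.any_eq_false] at h
    apply Bool.eq_false_iff.mpr
    intro hc
    rw [PySem.Set.contains_iff, mem_pvScan] at hc
    rcases hc with ⟨kc, hkc, hocc, hx⟩
    have hne : kc.1.toList ≠ [] := by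
      fin_cases hkc <;> simp
    rw [exists_pos_prefix_iff _ _ hne] at hocc
    have := h kc hkc
    rw [Bool.and_eq_true, decide_eq_true_eq, not_and] at this
    have hin := this hx
    rw [PySem.Str.isIn_eq] at hin
    exact hin hocc

-- ===== VERDICT (by name: the statement is the Claim_ definition above) =====
theorem infer_step_objective_type_py_spec : Claim_equal_infer_step_objective_type_py := by
  intro s _
  unfold Spec_infer_step_objective_type_py infer_step_objective_type_py infer_step_objective_type_py_alt
  set desc := PySem.Str.lower s with hdesc
  simp only [pvPriority, pvPick, contains_scan, pvKeywordCategory]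
  simp only [List.any_cons, List.any_nil]
  -- both sides are now if-chains over the same Boolean substring tests, in the same order
  simp only [Bool.or_false]
  by_cases h1 : (PySem.Str.isIn "extract" desc || PySem.Str.isIn "pull" desc ||
      PySem.Str.isIn "get data" desc || PySem.Str.isIn "scrape" desc) = true <;>
  by_cases h2 : (PySem.Str.isIn "navigate" desc || PySem.Str.isIn "go to" desc ||
      PySem.Str.isIn "visit" desc || PySem.Str.isIn "open" desc) = true <;>
  by_cases h3 : (PySem.Str.isIn "search" desc || PySem.Str.isIn "find" desc ||
      PySem.Str.isIn "look up" desc || PySem.Str.isIn "research" desc) = true <;>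
  by_cases h4 : (PySem.Str.isIn "calculate" desc || PySem.Str.isIn "compute" desc ||
      PySem.Str.isIn "solve" desc) = true <;>
  by_cases h5 : (PySem.Str.isIn "write" desc || PySem.Str.isIn "create" desc ||
      PySem.Str.isIn "generate" desc || PySem.Str.isIn "compose" desc) = true <;>
  simp_all
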